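-- pv_equiv track=rewrite | github.com/fursov/energy_scheduler | scheduler.py | get_low_prices
-- ===== SOURCE A (Python) =====
-- def find_average_value(prices):
--     total = sum(v['value'] for v in prices)
--     return total // len(prices)
--
-- def get_low_prices(prices):
--     all_slices = []
--     average = find_average_value(prices)
--     slice_started = False
--     for price in prices:
--         if price['value'] < average:
--             if not slice_started:
--                 slice = [price['value']]
--                 slice_started = True
--             else:
--                 slice.append(price['value'])
--         else:
--             if slice_started:
--                 slice_started = False
--                 all_slices.append(slice)
--     if slice_started:
--         all_slices.append(slice)
--     return all_slices
-- ===== SOURCE B (Python) =====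
-- def find_average_value(prices):
--     total = sum(v['value'] for v in prices)
--     return total // len(prices)
--
-- def get_low_prices(prices):
--     average = find_average_value(prices)
--     values = [p['value'] for p in prices]
--     all_slices = []
--     i = 0
--     while i < len(values):
--         if values[i] < average:
--             j = i
--             while j < len(values) and values[j] < average:
--                 j += 1
--             all_slices.append(values[i:j])
--             i = j
--         else:
--             i += 1
--     return all_slices
-- ===== Notes on version B (the rewrite author's own statement) =====
-- stated objective: alternative
-- what changed: Replaces the boolean slice_started flag and post-loop flush with an index-based run scanner: when a below-average value is found, an inner scan finds the end of the run and the whole slice is appended at once.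
import Mathlib
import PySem

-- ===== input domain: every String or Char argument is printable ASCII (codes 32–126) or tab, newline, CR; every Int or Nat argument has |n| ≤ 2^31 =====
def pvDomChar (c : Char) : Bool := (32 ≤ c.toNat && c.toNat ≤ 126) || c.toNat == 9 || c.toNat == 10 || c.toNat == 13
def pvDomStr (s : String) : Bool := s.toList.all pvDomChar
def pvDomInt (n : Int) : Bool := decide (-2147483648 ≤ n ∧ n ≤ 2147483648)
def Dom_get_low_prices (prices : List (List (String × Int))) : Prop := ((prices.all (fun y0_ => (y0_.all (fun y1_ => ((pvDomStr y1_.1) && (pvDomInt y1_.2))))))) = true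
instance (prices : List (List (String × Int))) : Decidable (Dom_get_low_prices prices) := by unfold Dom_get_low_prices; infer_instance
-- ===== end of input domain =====

-- B replaces A's slice_started flag + post-loop flush with a run scanner that slices
-- each maximal below-average run off the front; return values proved equal on Pre_.

-- ===== PORT A =====
-- price['value'] (Pre_ guarantees the key is present, so the default is never used)
def pvVal (p : List (String × Int)) : Int := (PySem.Dict.mk p).getD "value" 0

def find_average_value (prices : List (List (String × Int))) : Int :=
  PySem.Int.floordiv (prices.foldl (fun t p => t + pvVal p) 0) prices.length

-- loop state: (all_slices, slice_started/slice as an Option)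
def pvStepA (average : Int) (st : List (List Int) × Option (List Int))
    (price : List (String × Int)) : List (List Int) × Option (List Int) :=
  if pvVal price < average then
    match st.2 with
    | none => (st.1, some [pvVal price])
    | some s => (st.1, some (s ++ [pvVal price]))
  else
    match st.2 with
    | some s => (st.1 ++ [s], none)
    | none => st

def get_low_prices (prices : List (List (String × Int))) : List (List Int) :=
  let average := find_average_value prices
  let st := prices.foldl (pvStepA average) ([], none)
  match st.2 with
  | some s => st.1 ++ [s]
  | none => st.1

-- ===== PORT B =====
def find_average_value_alt (prices : List (List (String × Int))) : Int :=
  PySem.Int.floordiv (prices.foldl (fun t p => t + pvVal p) 0) prices.length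

-- the while loop over indices: slice off a maximal below-average run, or skip one value
def pvLowRuns (average : Int) : List Int → List (List Int)
  | [] => []
  | v :: vs =>
    if v < average then
      (v :: vs.takeWhile (· < average)) :: pvLowRuns average (vs.dropWhile (· < average))
    else
      pvLowRuns average vs
termination_by vs => vs.length
decreasing_by
  · simpa using Nat.lt_succ_of_le (List.length_dropWhile_le _ _)
  · simp

def get_low_prices_alt (prices : List (List (String × Int))) : List (List Int) :=
  let average := find_average_value_alt prices
  pvLowRuns average (prices.map pvVal)

-- ===== PRECONDITION & SPEC =====
-- Pre_ excludes exactly the inputs where the Python A raises: the empty list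
-- (ZeroDivisionError in find_average_value) and dicts missing the 'value' key (KeyError).
def Pre_get_low_prices (prices : List (List (String × Int))) : Prop :=
  prices ≠ [] ∧ (prices.all (fun p => ((PySem.Dict.mk p).get? "value").isSome)) = true
instance (prices : List (List (String × Int))) : Decidable (Pre_get_low_prices prices) := by
  unfold Pre_get_low_prices; infer_instance

def pvWitness_get_low_prices : (List (List (String × Int))) :=
  [[("value", 1)], [("value", 5)], [("value", 0)]]

def Spec_get_low_prices (prices : List (List (String × Int))) (out : List (List Int)) : Prop := out = get_low_prices_alt prices
instance (prices : List (List (String × Int))) (out : List (List Int)) : Decidable (Spec_get_low_prices prices out) := by unfold Spec_get_low_prices; infer_instance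

-- ===== CLAIM (what is proved, stated in full; the proofs are below) =====
def Claim_equal_get_low_prices : Prop := ∀ (prices : List (List (String × Int))), Dom_get_low_prices prices → Pre_get_low_prices prices → Spec_get_low_prices prices (get_low_prices prices)

-- ===== LEMMAS AND PROOFS =====

-- the invariant of A's fold, phrased over the value list
theorem pvFold_eq_lowRuns (average : Int) (vs : List Int)
    (acc : List (List Int)) (cur : Option (List Int)) :
    (match (vs.foldl (fun st v =>
        if v < average then
          match st.2 with
          | none => (st.1, some [v])
          | some s => (st.1, some (s ++ [v]))
        else
          match st.2 with
          | some s => (st.1 ++ [s], none)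
          | none => st) (acc, cur)).2 with
      | some s => (vs.foldl (fun st v =>
          if v < average then
            match st.2 with
            | none => (st.1, some [v])
            | some s => (st.1, some (s ++ [v]))
          else
            match st.2 with
            | some s => (st.1 ++ [s], none)
            | none => st) (acc, cur)).1 ++ [s]
      | none => (vs.foldl (fun st v =>
          if v < average then
            match st.2 with
            | none => (st.1, some [v])
            | some s => (st.1, some (s ++ [v]))
          else
            match st.2 with
            | some s => (st.1 ++ [s], none)
            | none => st) (acc, cur)).1) =
    acc ++ (match cur with
      | none => pvLowRuns average vs
      | some s => (s ++ vs.takeWhile (· < average)) :: pvLowRuns average (vs.dropWhile (· < average))) := by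
  induction vs generalizing acc cur with
  | nil => cases cur <;> simp [pvLowRuns]
  | cons v vs ih =>
    by_cases hv : v < average
    · cases cur with
      | none =>
        simp only [List.foldl_cons, if_pos hv]
        rw [ih]
        simp [pvLowRuns, hv]
      | some s =>
        simp only [List.foldl_cons, if_pos hv]
        rw [ih]
        simp [hv]
    · cases cur with
      | none =>
        simp only [List.foldl_cons, if_neg hv]
        rw [ih]
        simp [pvLowRuns, hv]
      | some s =>
        simp only [List.foldl_cons, if_neg hv]
        rw [ih]
        simp [pvLowRuns, hv]

-- ===== VERDICT (by name: the statement is the Claim_ definition above) =====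
theorem get_low_prices_spec : Claim_equal_get_low_prices := by
  intro prices _ _
  unfold Spec_get_low_prices get_low_prices get_low_prices_alt
  have havg : find_average_value prices = find_average_value_alt prices := rfl
  simp only [havg]
  have hmap : prices.foldl (pvStepA (find_average_value_alt prices)) ([], none)
      = (prices.map pvVal).foldl (fun st v =>
          if v < find_average_value_alt prices then
            match st.2 with
            | none => (st.1, some [v])
            | some s => (st.1, some (s ++ [v]))
          else
            match st.2 with
            | some s => (st.1 ++ [s], none)
            | none => st) ([], none) := by
    rw [List.foldl_map]
    rfl
  rw [hmap]
  simpa using pvFold_eq_lowRuns (find_average_value_alt prices) (prices.map pvVal) [] none
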